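-- pv_equiv track=rewrite | github.com/EaswarammaPreranaInc/sethubatch2dataengnieer | Tarun.banala_089_Aug_26.py | distinct_vowels
-- ===== SOURCE A (Python) =====
-- def distinct_vowels(input_string):
--     # Define vowels (both uppercase and lowercase)
--     vowels = "aeiouAEIOU"
--
--     # Convert input string to uppercase for case-insensitive comparison
--     upper_string = input_string.upper()
--
--     # Create a set to store distinct vowels
--     vowel_set = set()
--
--     # Iterate through each character in the string
--     for char in upper_string:
--         if char in vowels:
--             vowel_set.add(char)
--
--     # Convert set to sorted string
--     distinct_vowels_str = ''.join(sorted(vowel_set))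
--
--     return distinct_vowels_str
-- ===== SOURCE B (Python) =====
-- def distinct_vowels(input_string):
--     chars = set(input_string.upper())
--     return ''.join(v for v in "AEIOU" if v in chars)
-- ===== Notes on version B (the rewrite author's own statement) =====
-- stated objective: simpler
-- what changed: Instead of scanning for vowels, collecting them in a set and sorting, B builds one membership set of the uppercased characters and emits the fixed already-ordered vowel alphabet filtered by that set, so no sort and no per-character vowel test is needed.
import Mathlib
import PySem

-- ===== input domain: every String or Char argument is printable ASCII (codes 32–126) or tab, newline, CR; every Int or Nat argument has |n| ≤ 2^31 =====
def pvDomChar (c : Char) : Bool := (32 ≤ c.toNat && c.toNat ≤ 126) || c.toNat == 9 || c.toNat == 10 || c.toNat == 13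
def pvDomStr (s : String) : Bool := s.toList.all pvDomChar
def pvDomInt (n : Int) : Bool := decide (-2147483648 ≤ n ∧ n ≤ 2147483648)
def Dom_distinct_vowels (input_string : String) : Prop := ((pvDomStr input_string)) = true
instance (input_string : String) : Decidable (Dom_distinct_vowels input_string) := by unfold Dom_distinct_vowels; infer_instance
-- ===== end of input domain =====

-- B collects the uppercased characters in one set and filters the fixed ordered alphabet "AEIOU"
-- through it, replacing A's scan-then-sort strategy (objective: simpler).

-- ===== PORT A =====
def distinct_vowels (input_string : String) : String :=
  let vowels := "aeiouAEIOU"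
  let upper_string := PySem.Str.upper input_string
  -- Python's 'char in vowels' tests a 1-character needle: exactly list membership of that char
  let vowel_set : PySem.Set Char :=
    upper_string.toList.foldl
      (fun s c => if c ∈ vowels.toList then PySem.Set.add s c else s) PySem.Set.empty
  -- ''.join(sorted(vowel_set)): joining 1-character strings = String.mk of the sorted char list
  String.mk (PySem.List.sorted vowel_set (fun x => x) false)

-- ===== PORT B =====
def distinct_vowels_alt (input_string : String) : String :=
  let chars : PySem.Set Char := PySem.Set.ofList (PySem.Str.upper input_string).toList
  String.mk ("AEIOU".toList.filter (fun v => PySem.Set.contains chars v))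

-- ===== PRECONDITION & SPEC =====
def Spec_distinct_vowels (input_string : String) (out : String) : Prop := out = distinct_vowels_alt input_string
instance (input_string : String) (out : String) : Decidable (Spec_distinct_vowels input_string out) := by unfold Spec_distinct_vowels; infer_instance

-- ===== CLAIM (what is proved, stated in full; the proofs are below) =====
def Claim_equal_distinct_vowels : Prop := ∀ (input_string : String), Dom_distinct_vowels input_string → Spec_distinct_vowels input_string (distinct_vowels input_string)

-- ===== LEMMAS AND PROOFS =====

-- membership in A's accumulated set
theorem pv_fold_mem (V : List Char) (u : List Char) (s0 : PySem.Set Char) (x : Char) :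
    x ∈ u.foldl (fun s c => if c ∈ V then PySem.Set.add s c else s) s0 ↔
      x ∈ s0 ∨ (x ∈ u ∧ x ∈ V) := by
  induction u generalizing s0 with
  | nil => simp
  | cons c t ih =>
    simp only [List.foldl_cons, ih]
    by_cases hc : c ∈ V
    · simp [hc, PySem.Set.mem_add]
      constructor
      · rintro ((h | rfl) | ⟨h1, h2⟩)
        · exact Or.inl h
        · exact Or.inr ⟨Or.inl rfl, hc⟩
        · exact Or.inr ⟨Or.inr h1, h2⟩
      · rintro (h | ⟨(rfl | h1), h2⟩)
        · exact Or.inl (Or.inl h)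
        · exact Or.inl (Or.inr rfl)
        · exact Or.inr ⟨h1, h2⟩
    · simp only [hc, List.mem_cons]
      constructor
      · rintro (h | ⟨h1, h2⟩)
        · exact Or.inl h
        · exact Or.inr ⟨Or.inr h1, h2⟩
      · rintro (h | ⟨(rfl | h1), h2⟩)
        · exact Or.inl h
        · exact absurd h2 hc
        · exact Or.inr ⟨h1, h2⟩

-- A's accumulated set has no duplicates
theorem pv_fold_nodup (V : List Char) (u : List Char) (s0 : PySem.Set Char) (h0 : s0.Nodup) :
    (u.foldl (fun s c => if c ∈ V then PySem.Set.add s c else s) s0).Nodup := by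
  induction u generalizing s0 with
  | nil => exact h0
  | cons c t ih =>
    simp only [List.foldl_cons]
    split
    · exact ih _ (PySem.Set.nodup_add s0 c h0)
    · exact ih _ h0

-- Char.ofNat is faithful below the surrogate range
theorem pv_char_toNat_ofNat (n : Nat) (h : n < 55296) : (Char.ofNat n).toNat = n := by
  unfold Char.ofNat
  split
  · rfl
  · omega

-- an uppercased character is never a lowercase vowel
theorem pv_upperChar_not_lower_vowel (d : Char) :
    PySem.Chars.upperChar d ∉ (['a', 'e', 'i', 'o', 'u'] : List Char) := by
  intro hmem
  unfold PySem.Chars.upperChar at hmem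
  by_cases hl : PySem.Chars.islower d
  · rw [if_pos hl] at hmem
    have hnat : 97 ≤ d.toNat ∧ d.toNat ≤ 122 := by
      unfold PySem.Chars.islower at hl
      simp only [Bool.and_eq_true, decide_eq_true_eq] at hl
      exact hl
    have hle : (Char.ofNat (d.toNat - 32)).toNat ≤ 90 := by
      rw [pv_char_toNat_ofNat _ (by omega)]
      omega
    simp only [List.mem_cons, List.not_mem_nil, or_false] at hmem
    rcases hmem with h | h | h | h | h <;> rw [h] at hle <;> exact absurd hle (by decide)
  · rw [if_neg hl] at hmem
    apply hl
    unfold PySem.Chars.islower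
    simp only [List.mem_cons, List.not_mem_nil, or_false] at hmem
    rcases hmem with rfl | rfl | rfl | rfl | rfl <;> decide

-- the heart of the equivalence, stated over the uppercased character list
theorem pv_main (u : List Char)
    (hlow : ∀ x ∈ u, x ∉ (['a', 'e', 'i', 'o', 'u'] : List Char)) :
    PySem.List.sorted
      (u.foldl (fun s c => if c ∈ ("aeiouAEIOU" : String).toList then PySem.Set.add s c else s)
        PySem.Set.empty) (fun x => x) false
    = ("AEIOU" : String).toList.filter (fun v => PySem.Set.contains (PySem.Set.ofList u) v) := by
  set l := u.foldl
      (fun s c => if c ∈ ("aeiouAEIOU" : String).toList then PySem.Set.add s c else s)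
      PySem.Set.empty with hl
  have hmem : ∀ x, x ∈ l ↔ x ∈ u ∧ x ∈ ("aeiouAEIOU" : String).toList := by
    intro x
    rw [hl, pv_fold_mem]
    simp [PySem.Set.empty]
  have hnodup : l.Nodup := pv_fold_nodup _ u PySem.Set.empty (by simp [PySem.Set.empty])
  have hupper : ∀ x ∈ l, x ∈ ("AEIOU" : String).toList := by
    intro x hx
    obtain ⟨hxu, hxV⟩ := (hmem x).1 hx
    have hnl := hlow x hxu
    have hxV' : x ∈ (['a','e','i','o','u','A','E','I','O','U'] : List Char) := hxV
    simp only [List.mem_cons, List.not_mem_nil, or_false] at hxV'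
    rcases hxV' with rfl | rfl | rfl | rfl | rfl | rfl | rfl | rfl | rfl | rfl <;>
      first
      | exact absurd (by decide) hnl
      | decide
  have hfilter_perm :
      (("AEIOU" : String).toList.filter (fun v => decide (v ∈ l))).Perm l := by
    rw [List.perm_ext_iff_of_nodup (List.Nodup.filter _ (by decide)) hnodup]
    intro a
    simp only [List.mem_filter, decide_eq_true_eq]
    exact ⟨fun h => h.2, fun h => ⟨hupper a h, h⟩⟩
  have hsorted : PySem.List.sorted l (fun x => x) false =
      ("AEIOU" : String).toList.filter (fun v => decide (v ∈ l)) :=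
    PySem.List.sorted_eq_of_perm_of_pairwise_lt _ _ _ hfilter_perm
      (List.Pairwise.filter _ (by decide))
  rw [hsorted]
  apply List.filter_congr
  intro v hv
  have hvV : v ∈ ("aeiouAEIOU" : String).toList := by
    have hv' : v ∈ (['A','E','I','O','U'] : List Char) := hv
    simp only [List.mem_cons, List.not_mem_nil, or_false] at hv'
    rcases hv' with rfl | rfl | rfl | rfl | rfl <;> decide
  by_cases h : v ∈ u
  · have h1 : v ∈ l := (hmem v).2 ⟨h, hvV⟩
    have h2 : v ∈ PySem.Set.ofList u := (PySem.Set.mem_ofList _ _).2 h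
    simp only [h1, decide_true]
    simpa using h2
  · have h1 : v ∉ l := fun hc => h ((hmem v).1 hc).1
    have h2 : PySem.Set.contains (PySem.Set.ofList u) v = false := by
      by_contra hc
      simp only [Bool.not_eq_false] at hc
      exact h ((PySem.Set.mem_ofList _ _).1 ((PySem.Set.contains_iff _ _).1 hc))
    simp only [h1, decide_false]
    exact h2.symm

theorem distinct_vowels_spec_aux (input_string : String) :
    distinct_vowels input_string = distinct_vowels_alt input_string := by
  unfold distinct_vowels distinct_vowels_alt
  refine congrArg String.mk (pv_main _ ?_)
  intro x hx
  simp only [PySem.Str.toList_upper, PySem.Chars.upper, List.mem_map] at hx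
  obtain ⟨d, _, rfl⟩ := hx
  exact pv_upperChar_not_lower_vowel d

-- ===== VERDICT (by name: the statement is the Claim_ definition above) =====
theorem distinct_vowels_spec : Claim_equal_distinct_vowels := by
  intro s _
  exact distinct_vowels_spec_aux s
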